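-- pv_equiv track=rewrite | github.com/cstein1/twitter-bot-Markov-Chain | gracebot.py | makedic
-- ===== SOURCE A (Python) =====
-- def makedic(payload, key_length = 2):
--     grdic = {}
--     for line in payload:
--         for word,nxtword in window(line.split(), key_length):
--             if word in grdic:
--                 if nxtword in grdic[word]:
--                     grdic[word][nxtword]+=1
--                 else:
--                     grdic[word][nxtword]=1
--             else:
--                 grdic[word] = {nxtword:1}
--     return grdic
--
-- def window(iterator, window_width):
--     inds = [[a for a in range(i-window_width,i)] for i in range(window_width, len(iterator)+1)]
--     return [tuple([iterator[i] for i in ind]) for ind in inds]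
-- ===== SOURCE B (Python) =====
-- def window(words, width):
--     return [tuple(words[i:i + width]) for i in range(len(words) - width + 1)]
--
-- def makedic(payload, key_length = 2):
--     # pass 1: flat tally keyed by the (word, nextword) pair
--     tally = {}
--     for line in payload:
--         for word, nxtword in window(line.split(), key_length):
--             tally[(word, nxtword)] = tally.get((word, nxtword), 0) + 1
--     # pass 2: regroup the flat tally into the nested dictionary
--     grdic = {}
--     for (word, nxtword), count in tally.items():
--         if word in grdic:
--             grdic[word][nxtword] = count
--         else:
--             grdic[word] = {nxtword: count}
--     return grdic
-- ===== Notes on version B (the rewrite author's own statement) =====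
-- stated objective: alternative
-- what changed: A builds the nested word->nextword->count dict in one incremental pass with a four-way branch; B first builds a flat tally keyed by the (word, nextword) pair in one pass, then regroups that tally into the nested dict in a second pass (and its window helper slices words[i:i+width] instead of indexing via nested ranges).
import Mathlib
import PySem

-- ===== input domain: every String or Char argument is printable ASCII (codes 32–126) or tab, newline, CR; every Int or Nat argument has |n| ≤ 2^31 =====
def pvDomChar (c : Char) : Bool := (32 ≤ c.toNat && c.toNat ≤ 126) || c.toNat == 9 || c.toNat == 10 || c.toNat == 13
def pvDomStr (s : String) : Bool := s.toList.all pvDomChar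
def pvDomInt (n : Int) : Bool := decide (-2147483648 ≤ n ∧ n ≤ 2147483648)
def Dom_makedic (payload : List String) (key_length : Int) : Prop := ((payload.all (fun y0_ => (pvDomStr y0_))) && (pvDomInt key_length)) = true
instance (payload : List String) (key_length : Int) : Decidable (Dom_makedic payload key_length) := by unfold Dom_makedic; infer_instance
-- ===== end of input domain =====

-- B replaces A's single incremental nested-dict pass by a flat (word, nextword) tally built first
-- and a second pass regrouping it into the nested dict (objective: alternative decomposition, same cost).

-- Python's 'word, nxtword = t' (tuple unpack): some = success, none = ValueError (excluded by Pre_)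
def toPair : List String → Option (String × String)
  | [a, b] => some (a, b)
  | _ => none

-- ===== PORT A =====
-- window(iterator, window_width): indices via nested ranges, iterator[i] via pyGetD
-- (default "" is never used: on inputs admitted by Pre_ every index is in range)
def windowA (iterator : List String) (window_width : Int) : List (List String) :=
  let inds := (PySem.List.pyRange window_width ((iterator.length : Int) + 1) 1).map
      (fun i => PySem.List.pyRange (i - window_width) i 1)
  inds.map (fun ind => ind.map (fun i => PySem.List.pyGetD iterator i ""))

-- the body of A's inner loop (the four-way branch on 'word in grdic' / 'nxtword in grdic[word]')
def astep (g : PySem.Dict String (PySem.Dict String Int)) (word nxtword : String) :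
    PySem.Dict String (PySem.Dict String Int) :=
  if g.contains word then
    let inner := g.getD word PySem.Dict.empty
    if inner.contains nxtword then
      g.insert word (inner.insert nxtword (inner.getD nxtword 0 + 1))
    else
      g.insert word (inner.insert nxtword 1)
  else
    g.insert word (PySem.Dict.ofList [(nxtword, 1)])

def makedic (payload : List String) (key_length : Int) : List (String × List (String × Int)) :=
  let grdic : PySem.Dict String (PySem.Dict String Int) :=
    payload.foldl (fun g line =>
      (windowA (PySem.Str.split₀ line) key_length).foldl (fun g t =>
        match toPair t with
        | some (word, nxtword) => astep g word nxtword
        | none => g) g)   -- none: Python raises ValueError; Pre_ excludes such inputs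
      PySem.Dict.empty
  grdic.items.map (fun kv => (kv.1, kv.2.items))

-- ===== PORT B =====
-- B's window: [tuple(words[i:i+width]) for i in range(len(words) - width + 1)]
def windowB (words : List String) (width : Int) : List (List String) :=
  (PySem.List.pyRange 0 ((words.length : Int) - width + 1) 1).map
    (fun i => PySem.List.slice words (some i) (some (i + width)))

def makedic_alt (payload : List String) (key_length : Int) : List (String × List (String × Int)) :=
  -- pass 1: flat tally keyed by the (word, nextword) pair
  let tally : PySem.Dict (String × String) Int :=
    payload.foldl (fun t line =>
      (windowB (PySem.Str.split₀ line) key_length).foldl (fun t tup =>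
        match toPair tup with
        | some p => t.insert p (t.getD p 0 + 1)
        | none => t) t)   -- none: Python raises ValueError; Pre_ excludes such inputs
      PySem.Dict.empty
  -- pass 2: regroup the flat tally into the nested dictionary
  let grdic : PySem.Dict String (PySem.Dict String Int) :=
    tally.items.foldl (fun g it =>
      if g.contains it.1.1 then
        g.insert it.1.1 ((g.getD it.1.1 PySem.Dict.empty).insert it.1.2 it.2)
      else
        g.insert it.1.1 (PySem.Dict.ofList [(it.1.2, it.2)]))
      PySem.Dict.empty
  grdic.items.map (fun kv => (kv.1, kv.2.items))

-- ===== PRECONDITION & SPEC =====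
-- Pre_ excludes exactly the inputs on which Python A raises ValueError: unpacking 'word, nxtword'
-- fails whenever a window tuple of length ≠ 2 is produced, i.e. unless key_length = 2, or the
-- payload is empty, or key_length ≥ 1 and every line has fewer than key_length words.
def Pre_makedic (payload : List String) (key_length : Int) : Prop :=
  key_length = 2 ∨ payload = [] ∨
    (1 ≤ key_length ∧ ∀ line ∈ payload, ((PySem.Str.split₀ line).length : Int) < key_length)
instance (payload : List String) (key_length : Int) : Decidable (Pre_makedic payload key_length) := by
  unfold Pre_makedic; infer_instance

def pvWitness_makedic : List String × Int := (["a b a b", "b a"], 2)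

def Spec_makedic (payload : List String) (key_length : Int) (out : List (String × List (String × Int))) : Prop := out = makedic_alt payload key_length
instance (payload : List String) (key_length : Int) (out : List (String × List (String × Int))) : Decidable (Spec_makedic payload key_length out) := by unfold Spec_makedic; infer_instance

-- ===== CLAIM (what is proved, stated in full; the proofs are below) =====
def Claim_equal_makedic : Prop := ∀ (payload : List String) (key_length : Int), Dom_makedic payload key_length → Pre_makedic payload key_length → Spec_makedic payload key_length (makedic payload key_length)

-- ===== LEMMAS AND PROOFS =====

-- abbreviations used only by the proofs
def astepP (g : PySem.Dict String (PySem.Dict String Int)) (p : String × String) :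
    PySem.Dict String (PySem.Dict String Int) := astep g p.1 p.2

def tstep (t : PySem.Dict (String × String) Int) (p : String × String) :
    PySem.Dict (String × String) Int := t.insert p (t.getD p 0 + 1)

def rstep (g : PySem.Dict String (PySem.Dict String Int)) (it : (String × String) × Int) :
    PySem.Dict String (PySem.Dict String Int) :=
  if g.contains it.1.1 then
    g.insert it.1.1 ((g.getD it.1.1 PySem.Dict.empty).insert it.1.2 it.2)
  else
    g.insert it.1.1 (PySem.Dict.ofList [(it.1.2, it.2)])

-- 'increment the count at (p.1, p.2)' — the common shape of astep/rstep on an already-seen pair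
def incr (g : PySem.Dict String (PySem.Dict String Int)) (p : String × String) :
    PySem.Dict String (PySem.Dict String Int) :=
  g.insert p.1 ((g.getD p.1 PySem.Dict.empty).insert p.2
    ((g.getD p.1 PySem.Dict.empty).getD p.2 0 + 1))

-- the stream of (word, nextword) pairs a window list contributes
def pairsOfWin (w : List (List String)) : List (String × String) := w.filterMap toPair

def pairsA (payload : List String) (k : Int) : List (String × String) :=
  payload.flatMap (fun line => pairsOfWin (windowA (PySem.Str.split₀ line) k))

def pairsB (payload : List String) (k : Int) : List (String × String) :=
  payload.flatMap (fun line => pairsOfWin (windowB (PySem.Str.split₀ line) k))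

-- ---- window lemmas ----

theorem winA_nil (ws : List String) (k : Int) (h : (ws.length : Int) < k) :
    windowA ws k = [] := by
  unfold windowA
  rw [PySem.List.pyRange_one_eq_nil (by omega)]
  rfl

theorem winB_nil (ws : List String) (k : Int) (h : (ws.length : Int) < k) :
    windowB ws k = [] := by
  unfold windowB
  rw [PySem.List.pyRange_one_eq_nil (by omega)]
  rfl

theorem winA_pairs (ws : List String) :
    pairsOfWin (windowA ws 2)
      = (List.range (ws.length - 1)).map (fun j => (ws.getD j "", ws.getD (j+1) "")) := by
  unfold pairsOfWin windowA
  rw [PySem.List.pyRange_one]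
  have hn : (((ws.length : Int) + 1) - 2).toNat = ws.length - 1 := by omega
  rw [hn, List.map_map, List.map_map, List.filterMap_map]
  simp only [Function.comp_def]
  have key : ∀ j ∈ List.range (ws.length - 1),
      toPair ((PySem.List.pyRange (2 + (j : Int) - 2) (2 + (j : Int))).map
        (fun i => PySem.List.pyGetD ws i ""))
      = some (ws.getD j "", ws.getD (j+1) "") := by
    intro j _
    have h1 : (2 + (j : Int) - 2) = (j : Int) := by ring
    rw [h1, PySem.List.pyRange_one_cons (by omega), PySem.List.pyRange_one_cons (by omega),
      PySem.List.pyRange_one_eq_nil (by omega)]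
    simp only [List.map_cons, List.map_nil, toPair]
    have h2 : (j : Int) + 1 = ((j + 1 : ℕ) : Int) := by push_cast; ring
    rw [h2, PySem.List.pyGetD_natCast, PySem.List.pyGetD_natCast]
  rw [List.filterMap_congr key]
  simp

theorem winB_pairs (ws : List String) :
    pairsOfWin (windowB ws 2)
      = (List.range (ws.length - 1)).map (fun j => (ws.getD j "", ws.getD (j+1) "")) := by
  unfold pairsOfWin windowB
  rw [PySem.List.pyRange_one]
  have hn : (((ws.length : Int) - 2 + 1) - 0).toNat = ws.length - 1 := by omega
  rw [hn, List.map_map, List.filterMap_map]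
  simp only [Function.comp_def]
  have key : ∀ j ∈ List.range (ws.length - 1),
      toPair (PySem.List.slice ws (some (0 + (j : Int))) (some (0 + (j : Int) + 2)))
      = some (ws.getD j "", ws.getD (j+1) "") := by
    intro j hj
    rw [List.mem_range] at hj
    have hj1 : j + 1 < ws.length := by omega
    have hj0 : j < ws.length := by omega
    have h2 : (0 + (j : Int) + 2) = ((j : ℕ) : Int) + ((2 : ℕ) : Int) := by push_cast; ring
    have h0 : (0 + (j : Int)) = ((j : ℕ) : Int) := by ring
    rw [h2, h0, PySem.List.slice_natCast_add]
    rw [List.drop_eq_getElem_cons hj0, List.drop_eq_getElem_cons hj1]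
    simp only [List.take_succ_cons, List.take_zero, toPair]
    rw [List.getD_eq_getElem _ _ hj0, List.getD_eq_getElem _ _ hj1]
  rw [List.filterMap_congr key]
  simp

theorem flatMap_congr_mem {α β : Type} (l : List α) (f g : α → List β)
    (h : ∀ x ∈ l, f x = g x) : l.flatMap f = l.flatMap g := by
  induction l with
  | nil => rfl
  | cons a l ih =>
    simp only [List.flatMap_cons]
    rw [h a (List.mem_cons_self), ih (fun x hx => h x (List.mem_cons_of_mem a hx))]

theorem pairsA_eq_pairsB (payload : List String) (k : Int) (hpre : Pre_makedic payload k) :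
    pairsA payload k = pairsB payload k := by
  unfold pairsA pairsB
  rcases hpre with hk | hnil | ⟨hk1, hshort⟩
  · subst hk
    exact flatMap_congr_mem _ _ _ (fun line _ => by rw [winA_pairs, winB_pairs])
  · subst hnil; rfl
  · refine flatMap_congr_mem _ _ _ (fun line hline => ?_)
    rw [winA_nil _ _ (hshort line hline), winB_nil _ _ (hshort line hline)]

-- ---- rewriting the two ports as folds over the pair stream ----

theorem inner_fold_A (w : List (List String))
    (g : PySem.Dict String (PySem.Dict String Int)) :
    w.foldl (fun g t =>
        match toPair t with
        | some (word, nxtword) => astep g word nxtword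
        | none => g) g
      = (pairsOfWin w).foldl astepP g := by
  unfold pairsOfWin
  rw [List.foldl_filterMap]
  induction w generalizing g with
  | nil => rfl
  | cons t w ih =>
    simp only [List.foldl_cons]
    rw [ih]
    cases toPair t with
    | none => simp
    | some p => cases p; simp [astepP]

theorem makedic_eq_fold (payload : List String) (k : Int) :
    makedic payload k
      = ((pairsA payload k).foldl astepP PySem.Dict.empty).items.map
          (fun kv => (kv.1, kv.2.items)) := by
  unfold makedic pairsA
  rw [List.foldl_flatMap]
  simp only [inner_fold_A]

theorem inner_fold_B (w : List (List String)) (t : PySem.Dict (String × String) Int) :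
    w.foldl (fun t tup =>
        match toPair tup with
        | some p => t.insert p (t.getD p 0 + 1)
        | none => t) t
      = (pairsOfWin w).foldl tstep t := by
  unfold pairsOfWin
  rw [List.foldl_filterMap]
  induction w generalizing t with
  | nil => rfl
  | cons x w ih =>
    simp only [List.foldl_cons]
    rw [ih]
    cases toPair x with
    | none => simp
    | some p => simp [tstep]

theorem makedic_alt_eq_fold (payload : List String) (k : Int) :
    makedic_alt payload k
      = ((((pairsB payload k).foldl tstep PySem.Dict.empty).items).foldl rstep
            PySem.Dict.empty).items.map (fun kv => (kv.1, kv.2.items)) := by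
  unfold makedic_alt pairsB
  rw [List.foldl_flatMap]
  simp only [inner_fold_B]
  rfl

-- ---- dict helper lemmas ----

-- two inserts at distinct keys commute when the first key is already present
theorem ofList_single {κ ν : Type} [BEq κ] (k : κ) (v : ν) :
    PySem.Dict.ofList [(k, v)] = PySem.Dict.mk [(k, v)] := by
  rfl

theorem mk_single_insert_self {κ ν : Type} [BEq κ] [LawfulBEq κ] (k : κ) (v w : ν) :
    (PySem.Dict.mk [(k, v)]).insert k w = PySem.Dict.mk [(k, w)] := by
  simp [PySem.Dict.insert, PySem.Dict.contains]

theorem mk_single_getD_self {κ ν : Type} [BEq κ] [LawfulBEq κ] (k : κ) (v d0 : ν) :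
    (PySem.Dict.mk [(k, v)]).getD k d0 = v := by
  simp [PySem.Dict.getD, PySem.Dict.get?]

theorem mk_single_contains {κ ν : Type} [BEq κ] [LawfulBEq κ] (k k' : κ) (v : ν) :
    (PySem.Dict.mk [(k, v)]).contains k' = (k == k') := by
  simp [PySem.Dict.contains]

theorem insert_insert_comm_of_contains {κ ν : Type} [BEq κ] [LawfulBEq κ]
    (d : PySem.Dict κ ν) (k k' : κ) (v v' : ν) (hc : d.contains k = true) (hne : k' ≠ k) :
    (d.insert k v).insert k' v' = (d.insert k' v').insert k v := by
  apply PySem.Dict.ext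
  by_cases hc' : d.contains k' = true
  · have h1 : (d.insert k v).contains k' = true := by
      rw [PySem.Dict.contains_insert]; simp [hc']
    have h2 : (d.insert k' v').contains k = true := by
      rw [PySem.Dict.contains_insert]; simp [hc]
    rw [PySem.Dict.items_insert_of_contains _ _ h1, PySem.Dict.items_insert_of_contains _ _ hc,
      PySem.Dict.items_insert_of_contains _ _ h2, PySem.Dict.items_insert_of_contains _ _ hc',
      List.map_map, List.map_map]
    refine List.map_congr_left (fun p _ => ?_)
    simp only [Function.comp_def]
    by_cases hpk : p.1 = k
    · simp [hpk, beq_iff_eq, Ne.symm hne]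
    · by_cases hpk' : p.1 = k' <;> simp [hpk, hpk', beq_iff_eq, hne]
  · have h1 : (d.insert k v).contains k' = false := by
      rw [PySem.Dict.contains_insert]
      simp [hne, hc']
    have h2 : (d.insert k' v').contains k = true := by
      rw [PySem.Dict.contains_insert]; simp [hc]
    rw [PySem.Dict.items_insert_of_not_contains _ _ h1, PySem.Dict.items_insert_of_contains _ _ hc,
      PySem.Dict.items_insert_of_contains _ _ h2,
      PySem.Dict.items_insert_of_not_contains _ _ (by simpa using hc'), List.map_append]
    simp only [List.map_cons, List.map_nil]
    have e : (k' == k) = false := beq_eq_false_iff_ne.mpr hne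
    rw [e]
    simp

theorem contains_of_inner_contains (g : PySem.Dict String (PySem.Dict String Int))
    (w n : String) (h : (g.getD w PySem.Dict.empty).contains n = true) :
    g.contains w = true := by
  by_contra hc
  rw [PySem.Dict.getD_of_not_contains _ _ (by simpa using hc)] at h
  simp [PySem.Dict.contains, PySem.Dict.empty] at h

-- ---- invariants of the regroup fold ----

theorem inner_contains_rstep (g : PySem.Dict String (PySem.Dict String Int))
    (q : (String × String) × Int) (w n : String) :
    ((rstep g q).getD w PySem.Dict.empty).contains n
      = ((g.getD w PySem.Dict.empty).contains n || q.1 == (w, n)) := by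
  obtain ⟨⟨w2, n2⟩, c2⟩ := q
  unfold rstep
  by_cases hq : g.contains w2 = true
  · rw [if_pos hq, PySem.Dict.getD_insert]
    by_cases hw : w = w2
    · subst hw
      rw [if_pos rfl, PySem.Dict.contains_insert]
      by_cases hn : n = n2
      · subst hn; simp
      · have e1 : (n == n2) = false := beq_eq_false_iff_ne.mpr hn
        have e2 : (((w, n2) : String × String) == (w, n)) = false :=
          beq_eq_false_iff_ne.mpr (by
            intro h
            exact hn (congrArg Prod.snd h).symm)
        simp [e1, e2]
    · rw [if_neg hw]
      have e2 : (((w2, n2) : String × String) == (w, n)) = false :=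
        beq_eq_false_iff_ne.mpr (by
          intro h
          exact hw ((congrArg Prod.fst h)).symm)
      simp [e2]
  · rw [if_neg hq, PySem.Dict.getD_insert]
    by_cases hw : w = w2
    · subst hw
      rw [if_pos rfl, ofList_single, mk_single_contains]
      have hge : g.getD w PySem.Dict.empty = PySem.Dict.empty :=
        PySem.Dict.getD_of_not_contains _ _ (by simpa using hq)
      rw [hge]
      have hce : (PySem.Dict.empty : PySem.Dict String Int).contains n = false := by
        simp [PySem.Dict.contains, PySem.Dict.empty]
      rw [hce]
      by_cases hn : n = n2
      · subst hn; simp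
      · have e1 : (n2 == n) = false := beq_eq_false_iff_ne.mpr (Ne.symm hn)
        have e2 : (((w, n2) : String × String) == (w, n)) = false :=
          beq_eq_false_iff_ne.mpr (by
            intro h
            exact hn (congrArg Prod.snd h).symm)
        simp [e1, e2]
    · rw [if_neg hw]
      have e2 : (((w2, n2) : String × String) == (w, n)) = false :=
        beq_eq_false_iff_ne.mpr (by
          intro h
          exact hw ((congrArg Prod.fst h)).symm)
      simp [e2]

theorem regroup_inner_contains (l : List ((String × String) × Int))
    (g : PySem.Dict String (PySem.Dict String Int)) (w n : String) :
    ((l.foldl rstep g).getD w PySem.Dict.empty).contains n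
      = ((g.getD w PySem.Dict.empty).contains n || l.any (fun q => q.1 == (w, n))) := by
  induction l generalizing g with
  | nil => simp
  | cons q l ih =>
    simp only [List.foldl_cons, List.any_cons]
    rw [ih, inner_contains_rstep]
    by_cases h1 : (q.1 == (w, n)) = true <;>
      by_cases h2 : ((g.getD w PySem.Dict.empty).contains n) = true <;>
      simp [h1, h2]

-- ---- the three key step lemmas ----

theorem rstep_succ_eq_incr_rstep (g : PySem.Dict String (PySem.Dict String Int))
    (p : String × String) (c : Int) :
    rstep g (p, c + 1) = incr (rstep g (p, c)) p := by
  unfold rstep incr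
  dsimp only
  by_cases hc : g.contains p.1 = true
  · rw [if_pos hc, if_pos hc]
    rw [PySem.Dict.getD_insert_self, PySem.Dict.insert_insert_self,
      PySem.Dict.insert_insert_self, PySem.Dict.getD_insert_self]
  · rw [if_neg hc, if_neg hc]
    rw [PySem.Dict.getD_insert_self, PySem.Dict.insert_insert_self, ofList_single,
      ofList_single, mk_single_getD_self, mk_single_insert_self]

theorem inner_contains_rstep_self (g : PySem.Dict String (PySem.Dict String Int))
    (p : String × String) (c : Int) :
    ((rstep g (p, c)).getD p.1 PySem.Dict.empty).contains p.2 = true := by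
  unfold rstep
  by_cases hc : g.contains p.1 = true
  · rw [if_pos hc, PySem.Dict.getD_insert_self, PySem.Dict.contains_insert]
    simp
  · rw [if_neg hc, PySem.Dict.getD_insert_self, ofList_single, mk_single_contains]
    simp

theorem inner_preserved (g : PySem.Dict String (PySem.Dict String Int))
    (q : (String × String) × Int) (p : String × String)
    (hin : (g.getD p.1 PySem.Dict.empty).contains p.2 = true) :
    ((rstep g q).getD p.1 PySem.Dict.empty).contains p.2 = true := by
  rw [inner_contains_rstep, hin]
  simp

theorem rstep_incr_comm (g : PySem.Dict String (PySem.Dict String Int))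
    (p : String × String) (q : (String × String) × Int)
    (hne : q.1 ≠ p) (hin : (g.getD p.1 PySem.Dict.empty).contains p.2 = true) :
    rstep (incr g p) q = incr (rstep g q) p := by
  obtain ⟨w, n⟩ := p
  obtain ⟨⟨w2, n2⟩, c2⟩ := q
  have hw : g.contains w = true := contains_of_inner_contains _ _ _ hin
  unfold rstep incr
  by_cases hww : w2 = w
  · subst hww
    have hnn : n2 ≠ n := by
      intro h
      exact hne (by rw [h])
    rw [if_pos (PySem.Dict.contains_insert_self _ _ _), PySem.Dict.getD_insert_self,
      PySem.Dict.insert_insert_self, if_pos hw, PySem.Dict.getD_insert_self,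
      PySem.Dict.insert_insert_self,
      PySem.Dict.getD_insert_of_ne _ _ _ (Ne.symm hnn),
      insert_insert_comm_of_contains _ _ _ _ _ hin hnn]
  · have hcw2 : ((g.insert w ((g.getD w PySem.Dict.empty).insert n
        ((g.getD w PySem.Dict.empty).getD n 0 + 1))).contains w2) = g.contains w2 := by
      rw [PySem.Dict.contains_insert, beq_eq_false_iff_ne.mpr hww]
      simp
    by_cases hc2 : g.contains w2 = true
    · rw [if_pos (by rw [hcw2]; exact hc2), if_pos hc2,
        PySem.Dict.getD_insert_of_ne _ _ _ hww,
        PySem.Dict.getD_insert_of_ne _ _ _ (Ne.symm hww),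
        insert_insert_comm_of_contains _ _ _ _ _ hw hww]
    · rw [if_neg (by rw [hcw2]; exact hc2), if_neg hc2,
        PySem.Dict.getD_insert_of_ne _ _ _ (Ne.symm hww),
        insert_insert_comm_of_contains _ _ _ _ _ hw hww]

theorem incr_comm_fold (l : List ((String × String) × Int))
    (g : PySem.Dict String (PySem.Dict String Int)) (p : String × String)
    (hl : ∀ q ∈ l, q.1 ≠ p) (hin : (g.getD p.1 PySem.Dict.empty).contains p.2 = true) :
    l.foldl rstep (incr g p) = incr (l.foldl rstep g) p := by
  induction l generalizing g with
  | nil => rfl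
  | cons q l ih =>
    simp only [List.foldl_cons]
    rw [rstep_incr_comm g p q (hl q List.mem_cons_self) hin]
    exact ih (rstep g q) (fun x hx => hl x (List.mem_cons_of_mem q hx))
      (inner_preserved g q p hin)

theorem astep_eq_incr (g : PySem.Dict String (PySem.Dict String Int)) (p : String × String)
    (hin : (g.getD p.1 PySem.Dict.empty).contains p.2 = true) :
    astepP g p = incr g p := by
  have hw : g.contains p.1 = true := contains_of_inner_contains _ _ _ hin
  unfold astepP astep incr
  rw [if_pos hw, if_pos hin]

-- ---- the core theorem: one incremental pass = tally then regroup ----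

theorem empty_getD_empty (w : String) :
    ((PySem.Dict.empty : PySem.Dict String (PySem.Dict String Int)).getD w
      PySem.Dict.empty) = PySem.Dict.empty := by
  rfl

theorem rstep_one_eq_astep (G : PySem.Dict String (PySem.Dict String Int))
    (p : String × String)
    (hinner : (G.getD p.1 PySem.Dict.empty).contains p.2 = false) :
    rstep G (p, 1) = astepP G p := by
  unfold rstep astepP astep
  dsimp only
  by_cases hgw : G.contains p.1 = true
  · rw [if_pos hgw, if_pos hgw, if_neg (by rw [hinner]; simp)]
  · rw [if_neg hgw, if_neg hgw]

theorem regroup_tstep (t : PySem.Dict (String × String) Int) (p : String × String)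
    (hnd : t.keys.Nodup) :
    ((tstep t p).items).foldl rstep PySem.Dict.empty
      = astepP ((t.items).foldl rstep PySem.Dict.empty) p := by
  unfold tstep
  by_cases hcp : t.contains p = true
  · -- p already tallied: the insert overwrites in place
    obtain ⟨c, hc⟩ : ∃ c, t.get? p = some c := by
      have := PySem.Dict.contains_eq_isSome_get? t p
      rw [hcp] at this
      exact Option.isSome_iff_exists.mp this.symm
    have hv : t.getD p 0 = c := by rw [PySem.Dict.getD_eq_get?_getD, hc]; rfl
    have hmem : (p, c) ∈ t.items := PySem.Dict.mem_items_of_get?_eq_some t hc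
    obtain ⟨l1, l2, hsplit⟩ := List.append_of_mem hmem
    have hnd' : (t.items.map (fun q => q.1)).Nodup := hnd
    rw [hsplit] at hnd'
    simp only [List.map_append, List.map_cons] at hnd'
    obtain ⟨-, h2, hdisj⟩ := List.nodup_append.mp hnd'
    have hpB : p ∉ l2.map (fun q => q.1) := (List.nodup_cons.mp h2).1
    have hpA : p ∉ l1.map (fun q => q.1) := fun hA =>
      hdisj p hA p List.mem_cons_self rfl
    have hp1 : ∀ q ∈ l1, q.1 ≠ p := fun q hq h =>
      hpA (h ▸ List.mem_map_of_mem hq)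
    have hp2 : ∀ q ∈ l2, q.1 ≠ p := fun q hq h =>
      hpB (h ▸ List.mem_map_of_mem hq)
    rw [hv, PySem.Dict.items_insert_of_contains _ _ hcp, hsplit]
    simp only [List.map_append, List.map_cons]
    have hl1 : l1.map (fun q => if (q.1 == p) = true then (p, c + 1) else q) = l1 := by
      rw [List.map_congr_left (g := fun q => q) (fun q hq => by
        simp [beq_eq_false_iff_ne.mpr (hp1 q hq)])]
      exact List.map_id _
    have hl2 : l2.map (fun q => if (q.1 == p) = true then (p, c + 1) else q) = l2 := by
      rw [List.map_congr_left (g := fun q => q) (fun q hq => by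
        simp [beq_eq_false_iff_ne.mpr (hp2 q hq)])]
      exact List.map_id _
    have hown : (if (((p, c).1 == p) = true) then (p, c + 1) else (p, c)) = (p, c + 1) := by
      simp
    rw [hl1, hl2, hown, List.foldl_append, List.foldl_cons, List.foldl_append, List.foldl_cons]
    rw [rstep_succ_eq_incr_rstep]
    rw [incr_comm_fold l2 _ p hp2 (inner_contains_rstep_self _ p c)]
    have hin2 : (((l2.foldl rstep (rstep (l1.foldl rstep PySem.Dict.empty) (p, c))).getD p.1
        PySem.Dict.empty).contains p.2) = true := by
      rw [regroup_inner_contains, inner_contains_rstep_self]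
      simp
    rw [astep_eq_incr _ p hin2]
  · -- p not yet tallied: the insert appends
    have hv : t.getD p 0 = 0 := PySem.Dict.getD_of_not_contains _ _ (by simpa using hcp)
    rw [hv, PySem.Dict.items_insert_of_not_contains _ _ (by simpa using hcp), List.foldl_append,
      List.foldl_cons, List.foldl_nil, zero_add]
    have hinner : ((t.items.foldl rstep PySem.Dict.empty).getD p.1
        PySem.Dict.empty).contains p.2 = false := by
      rw [regroup_inner_contains, empty_getD_empty]
      have hany : t.items.any (fun q => q.1 == (p.1, p.2)) = false := by
        have hcf : t.contains (p.1, p.2) = false := by simpa using hcp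
        exact hcf
      rw [hany]
      simp [PySem.Dict.contains, PySem.Dict.empty]
    exact rstep_one_eq_astep _ p hinner

theorem core (ps : List (String × String)) :
    ps.foldl astepP PySem.Dict.empty
      = ((ps.foldl tstep PySem.Dict.empty).items).foldl rstep PySem.Dict.empty := by
  induction ps using List.reverseRecOn with
  | nil => rfl
  | append_singleton l p ih =>
    rw [List.foldl_append, List.foldl_append]
    simp only [List.foldl_cons, List.foldl_nil]
    have hnd : (l.foldl tstep PySem.Dict.empty).keys.Nodup := by
      have he : (l.foldl tstep PySem.Dict.empty)
          = l.foldl (fun d x => d.insert x (d.getD x 0 + 1)) PySem.Dict.empty := rfl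
      rw [he]
      exact PySem.Dict.nodup_keys_foldl_insert l _ _ (by simp [PySem.Dict.keys, PySem.Dict.empty])
    rw [regroup_tstep _ p hnd, ih]

-- ===== VERDICT (by name: the statement is the Claim_ definition above) =====
theorem makedic_spec : Claim_equal_makedic := by
  intro payload key_length _hdom hpre
  unfold Spec_makedic
  rw [makedic_eq_fold, makedic_alt_eq_fold, pairsA_eq_pairsB payload key_length hpre, core]
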